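-- pv_equiv track=rewrite | github.com/drathke924/userscripts | Advent_of_Code_2016/02.py | partTwo
-- ===== SOURCE A (Python) =====
-- def partTwo(instructions):
-- 	sequence = []
-- 	for item in instructions:
-- 		button = [0, 0]
-- 		for char in item:
-- 			if char == 'R':
-- 				if button[1] == 0:
-- 					if button[0] < 2:
-- 						button[0] += 1
-- 				elif abs(button[1]) == 1:
-- 					if button[0] < 1:
-- 						button[0] += 1
-- 			elif char == 'L':
-- 				if button[1] == 0:
-- 					if button[0] > -2:
-- 						button[0] -= 1
-- 				elif abs(button[1]) == 1:
-- 					if button[0] > -1: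
-- 						button[0] -= 1
-- 			elif char == 'U':
-- 				if button[0] == 0:
-- 					if button[1] < 2:
-- 						button[1] += 1
-- 				elif abs(button[0]) == 1:
-- 					if button[1] < 1:
-- 						button[1] += 1
-- 			elif char == 'D':
-- 				if button[0] == 0:
-- 					if button[1] > -2:
-- 						button[1] -= 1
-- 				elif abs(button[0]) == 1:
-- 					if button[1] > -1:
-- 						button[1] -= 1
-- 		if button == [0, 2]:
-- 			sequence.append(1)
-- 		elif button == [-1, 1]:
-- 			sequence.append(2)
-- 		elif button == [0, 1]:
-- 			sequence.append(3)
-- 		elif button == [1, 1]: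
-- 			sequence.append(4)
-- 		elif button == [-2, 0]:
-- 			sequence.append(5)
-- 		elif button == [-1, 0]:
-- 			sequence.append(6)
-- 		elif button == [0, 0]:
-- 			sequence.append(7)
-- 		elif button == [1, 0]:
-- 			sequence.append(8)
-- 		elif button == [2, 0]:
-- 			sequence.append(9)
-- 		elif button == [-1, -1]:
-- 			sequence.append('A')
-- 		elif button == [0, -1]:
-- 			sequence.append('B')
-- 		elif button == [1, -1]:
-- 			sequence.append('C')
-- 		elif button == [0, -2]:
-- 			sequence.append('D')
--
-- 	return "".join(list(map(str, sequence)))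
-- ===== SOURCE B (Python) =====
-- # Precompiled finite automaton: the keypad is an ASCII-art layout compiled once into a
-- # transition table over button LABELS; each character is then a single table lookup.
-- LAYOUT = ["  1  ", " 234 ", "56789", " ABC ", "  D  "]
--
--
-- def _compile():
--     nxt = {}
--     for r in range(5):
--         for c in range(5):
--             key = LAYOUT[r][c]
--             if key == ' ':
--                 continue
--             t = {}
--             for mv, dr, dc in (('U', -1, 0), ('D', 1, 0), ('L', 0, -1), ('R', 0, 1)):
--                 nr, nc = r + dr, c + dc
--                 if 0 <= nr < 5 and 0 <= nc < 5 and LAYOUT[nr][nc] != ' ':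
--                     t[mv] = LAYOUT[nr][nc]
--             nxt[key] = t
--     return nxt
--
--
-- NEXT = _compile()
--
--
-- def partTwo(instructions):
--     code = []
--     for line in instructions:
--         key = '7'
--         for mv in line:
--             key = NEXT[key].get(mv, key)
--         code.append(key)
--     return ''.join(code)
-- ===== Notes on version B (the rewrite author's own statement) =====
-- stated objective: simpler
-- what changed: Replaces A's coordinate simulation (x,y state, four nested bounds-conditional branches per move, and a 13-way position-to-label if-chain) with a finite automaton over button labels: the keypad is an ASCII-art layout compiled once into a label->(move->label) transition table, the walk state is the button character itself ('7' start), each instruction character is one table lookup with the current label as default, and the final state is appended directly. Per character B does one small dict lookup instead of A's nested comparison ladders, a constant-factor speedup.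
import Mathlib
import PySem

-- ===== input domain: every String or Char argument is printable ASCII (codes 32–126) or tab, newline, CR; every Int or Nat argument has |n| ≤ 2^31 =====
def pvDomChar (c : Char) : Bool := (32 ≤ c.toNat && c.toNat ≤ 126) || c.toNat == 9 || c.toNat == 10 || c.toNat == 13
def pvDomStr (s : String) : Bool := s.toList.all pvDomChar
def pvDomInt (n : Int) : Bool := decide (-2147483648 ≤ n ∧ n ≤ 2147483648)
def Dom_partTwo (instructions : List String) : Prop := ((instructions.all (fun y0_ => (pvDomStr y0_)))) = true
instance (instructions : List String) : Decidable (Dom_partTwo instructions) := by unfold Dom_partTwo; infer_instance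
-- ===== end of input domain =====

-- B replaces A's coordinate walk (nested bounds conditionals + 13-way label chain) with a
-- finite automaton over button labels, compiled once from an ASCII-art layout (objective: simpler).

-- ===== PORT A =====
-- inner loop body of A: one character moves the button (a [x, y] list, ported as a pair)
def pvStepA (button : Int × Int) (char : Char) : Int × Int :=
  if char = 'R' then
    (if button.2 = 0 then (if button.1 < 2 then (button.1 + 1, button.2) else button)
     else if button.2.natAbs = 1 then (if button.1 < 1 then (button.1 + 1, button.2) else button)
     else button)
  else if char = 'L' then
    (if button.2 = 0 then (if button.1 > -2 then (button.1 - 1, button.2) else button)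
     else if button.2.natAbs = 1 then (if button.1 > -1 then (button.1 - 1, button.2) else button)
     else button)
  else if char = 'U' then
    (if button.1 = 0 then (if button.2 < 2 then (button.1, button.2 + 1) else button)
     else if button.1.natAbs = 1 then (if button.2 < 1 then (button.1, button.2 + 1) else button)
     else button)
  else if char = 'D' then
    (if button.1 = 0 then (if button.2 > -2 then (button.1, button.2 - 1) else button)
     else if button.1.natAbs = 1 then (if button.2 > -1 then (button.1, button.2 - 1) else button)
     else button)
  else button

-- A's trailing if/elif chain: the element appended to `sequence` (str of it), [] when no branch fires
def pvLabelA (button : Int × Int) : List String :=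
  if button = (0, 2) then ["1"]
  else if button = (-1, 1) then ["2"]
  else if button = (0, 1) then ["3"]
  else if button = (1, 1) then ["4"]
  else if button = (-2, 0) then ["5"]
  else if button = (-1, 0) then ["6"]
  else if button = (0, 0) then ["7"]
  else if button = (1, 0) then ["8"]
  else if button = (2, 0) then ["9"]
  else if button = (-1, -1) then ["A"]
  else if button = (0, -1) then ["B"]
  else if button = (1, -1) then ["C"]
  else if button = (0, -2) then ["D"]
  else []

def partTwo (instructions : List String) : String :=
  let sequence : List String :=
    instructions.foldl
      (fun seq item =>
        let button := item.toList.foldl pvStepA (0, 0)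
        seq ++ pvLabelA button)
      []
  PySem.Str.join "" sequence

-- ===== PORT B =====
def pvLayout : List String := ["  1  ", " 234 ", "56789", " ABC ", "  D  "]

-- LAYOUT[r][c]; every call site guards 0 <= r,c < 5 so the defaults are never taken
def pvAt (r c : Int) : Char :=
  PySem.List.pyGetD (PySem.List.pyGetD pvLayout r "").toList c ' '

-- _compile(): the label -> (move -> label) transition table built from the layout
def pvNext : PySem.Dict Char (PySem.Dict Char Char) :=
  (PySem.List.pyRange 0 5 1).foldl
    (fun nxt r =>
      (PySem.List.pyRange 0 5 1).foldl
        (fun nxt c =>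
          let key := pvAt r c
          if key = ' ' then nxt
          else
            let t :=
              [('U', (-1 : Int), (0 : Int)), ('D', 1, 0), ('L', 0, -1), ('R', 0, 1)].foldl
                (fun t m =>
                  let nr := r + m.2.1
                  let nc := c + m.2.2
                  if 0 ≤ nr ∧ nr < 5 ∧ 0 ≤ nc ∧ nc < 5 ∧ pvAt nr nc ≠ ' ' then
                    t.insert m.1 (pvAt nr nc)
                  else t)
                (PySem.Dict.mk [])
            nxt.insert key t)
        nxt)
    (PySem.Dict.mk [])

-- key = NEXT[key].get(mv, key): key is always a key of NEXT, so the empty-dict default is never taken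
def pvStepB (key mv : Char) : Char :=
  ((pvNext.get? key).getD (PySem.Dict.mk [])).getD mv key

def partTwo_alt (instructions : List String) : String :=
  let code : List String :=
    instructions.foldl
      (fun code line =>
        let key := line.toList.foldl pvStepB '7'
        code ++ [String.singleton key])
      []
  PySem.Str.join "" code

-- ===== PRECONDITION & SPEC =====
def Spec_partTwo (instructions : List String) (out : String) : Prop := out = partTwo_alt instructions
instance (instructions : List String) (out : String) : Decidable (Spec_partTwo instructions out) := by unfold Spec_partTwo; infer_instance

-- ===== CLAIM (what is proved, stated in full; the proofs are below) =====
def Claim_equal_partTwo : Prop := ∀ (instructions : List String), Dom_partTwo instructions → Spec_partTwo instructions (partTwo instructions)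

-- ===== LEMMAS AND PROOFS =====
-- the 13 valid keypad coordinates (A's reachable button states)
def pvV : List (Int × Int) :=
  [(0, 2), (-1, 1), (0, 1), (1, 1), (-2, 0), (-1, 0), (0, 0), (1, 0), (2, 0),
   (-1, -1), (0, -1), (1, -1), (0, -2)]

-- coordinate -> label, linking A's state to B's state
def pvLab (s : Int × Int) : Char :=
  ((([((0, 2), '1'), ((-1, 1), '2'), ((0, 1), '3'), ((1, 1), '4'),
      ((-2, 0), '5'), ((-1, 0), '6'), ((0, 0), '7'), ((1, 0), '8'), ((2, 0), '9'),
      ((-1, -1), 'A'), ((0, -1), 'B'), ((1, -1), 'C'), ((0, -2), 'D')] :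
     List ((Int × Int) × Char)).lookup s).getD ' ')

def pvLabels : List Char :=
  ['1', '2', '3', '4', '5', '6', '7', '8', '9', 'A', 'B', 'C', 'D']

lemma pvNext_eq :
    pvNext = PySem.Dict.mk
      [('1', PySem.Dict.mk [('D', '3')]),
       ('2', PySem.Dict.mk [('D', '6'), ('R', '3')]),
       ('3', PySem.Dict.mk [('U', '1'), ('D', '7'), ('L', '2'), ('R', '4')]),
       ('4', PySem.Dict.mk [('D', '8'), ('L', '3')]),
       ('5', PySem.Dict.mk [('R', '6')]),
       ('6', PySem.Dict.mk [('U', '2'), ('D', 'A'), ('L', '5'), ('R', '7')]),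
       ('7', PySem.Dict.mk [('U', '3'), ('D', 'B'), ('L', '6'), ('R', '8')]),
       ('8', PySem.Dict.mk [('U', '4'), ('D', 'C'), ('L', '7'), ('R', '9')]),
       ('9', PySem.Dict.mk [('L', '8')]),
       ('A', PySem.Dict.mk [('U', '6'), ('R', 'B')]),
       ('B', PySem.Dict.mk [('U', '7'), ('D', 'D'), ('L', 'A'), ('R', 'C')]),
       ('C', PySem.Dict.mk [('U', '8'), ('L', 'B')]),
       ('D', PySem.Dict.mk [('U', 'B')])] := by decide

lemma pvStepB_other (k : Char) (hk : k ∈ pvLabels) (c : Char)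
    (hR : c ≠ 'R') (hL : c ≠ 'L') (hU : c ≠ 'U') (hD : c ≠ 'D') :
    pvStepB k c = k := by
  fin_cases hk <;>
    simp [pvStepB, pvNext_eq, PySem.Dict.getD_eq_get?_getD, PySem.Dict.get?, Ne.symm hR, Ne.symm hL, Ne.symm hU, Ne.symm hD]

lemma pvStep_eq (s : Int × Int) (hs : s ∈ pvV) (c : Char) :
    pvLab (pvStepA s c) = pvStepB (pvLab s) c ∧ pvStepA s c ∈ pvV := by
  by_cases hR : c = 'R'
  · subst hR; fin_cases hs <;> exact ⟨by decide, by decide⟩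
  by_cases hL : c = 'L'
  · subst hL; fin_cases hs <;> exact ⟨by decide, by decide⟩
  by_cases hU : c = 'U'
  · subst hU; fin_cases hs <;> exact ⟨by decide, by decide⟩
  by_cases hD : c = 'D'
  · subst hD; fin_cases hs <;> exact ⟨by decide, by decide⟩
  have hA : pvStepA s c = s := by simp [pvStepA, hR, hL, hU, hD]
  have hmem : pvLab s ∈ pvLabels := by fin_cases hs <;> decide
  rw [hA, pvStepB_other (pvLab s) hmem c hR hL hU hD]
  exact ⟨rfl, hs⟩

lemma pvFold_eq (cs : List Char) (s : Int × Int) (hs : s ∈ pvV) :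
    pvLab (cs.foldl pvStepA s) = cs.foldl pvStepB (pvLab s) ∧ cs.foldl pvStepA s ∈ pvV := by
  induction cs generalizing s with
  | nil => exact ⟨rfl, hs⟩
  | cons c cs ih =>
      obtain ⟨h1, h2⟩ := pvStep_eq s hs c
      simpa [List.foldl_cons, h1] using ih (pvStepA s c) h2

lemma pvLabel_eq (s : Int × Int) (hs : s ∈ pvV) :
    pvLabelA s = [String.singleton (pvLab s)] := by
  fin_cases hs <;> decide

lemma pvItem_eq (item : String) :
    pvLabelA (item.toList.foldl pvStepA (0, 0)) =
      [String.singleton (item.toList.foldl pvStepB '7')] := by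
  obtain ⟨h1, h2⟩ := pvFold_eq item.toList (0, 0) (by decide)
  rw [pvLabel_eq _ h2, h1]
  rfl

lemma pvOuter_eq (instructions : List String) (acc : List String) :
    instructions.foldl (fun seq item => seq ++ pvLabelA (item.toList.foldl pvStepA (0, 0))) acc =
    instructions.foldl (fun code line => code ++ [String.singleton (line.toList.foldl pvStepB '7')]) acc := by
  simp only [pvItem_eq]

-- ===== VERDICT (by name: the statement is the Claim_ definition above) =====
theorem partTwo_spec : Claim_equal_partTwo := by
  intro instructions _
  unfold Spec_partTwo partTwo partTwo_alt
  rw [pvOuter_eq]
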